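-- pv_equiv track=rewrite | github.com/DnielCC/Macuin | Flask/services/reports.py | _normalize_section_order
-- ===== SOURCE A (Python) =====
-- from typing import Any, Dict, List, Optional, Tuple
--
-- def _normalize_section_order(raw: List[str]) -> List[str]:
--     """Portada y resumen primero; el resto conserva el orden del formulario."""
--     seen: set[str] = set()
--     out: List[str] = []
--     for x in ("portada", "resumen"):
--         if x in raw and x not in seen:
--             out.append(x)
--             seen.add(x)
--     for x in raw:
--         if x not in seen:
--             out.append(x)
--             seen.add(x)
--     return out
-- ===== SOURCE B (Python) =====
-- from typing import List
--
-- def _normalize_section_order(raw: List[str]) -> List[str]: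
--     """Portada y resumen primero; el resto conserva el orden del formulario."""
--     deduped = list(dict.fromkeys(raw))
--     return sorted(deduped, key=lambda s: 0 if s == "portada" else (1 if s == "resumen" else 2))
-- ===== Notes on version B (the rewrite author's own statement) =====
-- stated objective: idiomatic
-- what changed: Replaces the two explicit loops with a mutable seen-set by an order-preserving dict.fromkeys dedup followed by one stable sorted() with a 3-valued priority key (portada=0, resumen=1, rest=2); stability keeps the original order inside each group.
import Mathlib
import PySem

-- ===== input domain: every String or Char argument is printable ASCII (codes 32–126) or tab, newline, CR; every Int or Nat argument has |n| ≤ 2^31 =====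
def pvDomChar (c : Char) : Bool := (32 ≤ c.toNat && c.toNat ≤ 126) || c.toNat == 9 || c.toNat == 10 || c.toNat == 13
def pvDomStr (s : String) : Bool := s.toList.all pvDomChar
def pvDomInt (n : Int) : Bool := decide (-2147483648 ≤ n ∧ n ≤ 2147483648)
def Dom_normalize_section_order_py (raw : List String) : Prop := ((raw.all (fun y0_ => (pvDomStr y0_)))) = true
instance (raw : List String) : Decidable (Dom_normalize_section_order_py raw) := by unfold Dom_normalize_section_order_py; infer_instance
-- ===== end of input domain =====

-- B replaces A's two loops with a mutable seen-set by an ordered dedup plus one stable sort with a 3-valued priority key (idiomatic, not faster).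

-- ===== PORT A =====
def normalize_section_order_py (raw : List String) : List String :=
  -- seen = set(); out = []; first loop over the literal tuple, then over raw
  let st1 := (["portada", "resumen"]).foldl
    (fun (st : PySem.Set String × List String) x =>
      if raw.contains x && !(st.1.contains x) then (st.1.add x, st.2 ++ [x]) else st)
    (PySem.Set.empty, [])
  let st2 := raw.foldl
    (fun (st : PySem.Set String × List String) x =>
      if !(st.1.contains x) then (st.1.add x, st.2 ++ [x]) else st) st1
  st2.2

-- ===== PORT B =====
-- B's sort key: 0 if s == "portada" else (1 if s == "resumen" else 2)
def pvKey (s : String) : Nat := if s = "portada" then 0 else if s = "resumen" then 1 else 2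

def normalize_section_order_py_alt (raw : List String) : List String :=
  PySem.List.sorted (PySem.List.dedup raw) pvKey false

-- ===== PRECONDITION & SPEC =====
def Spec_normalize_section_order_py (raw : List String) (out : List String) : Prop := out = normalize_section_order_py_alt raw
instance (raw : List String) (out : List String) : Decidable (Spec_normalize_section_order_py raw out) := by unfold Spec_normalize_section_order_py; infer_instance

-- ===== CLAIM (what is proved, stated in full; the proofs are below) =====
def Claim_equal_normalize_section_order_py : Prop := ∀ (raw : List String), Dom_normalize_section_order_py raw → Spec_normalize_section_order_py raw (normalize_section_order_py raw)

-- ===== LEMMAS AND PROOFS =====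

-- first-occurrence dedup of xs, skipping elements already in the seen-set s
def dfS (s : PySem.Set String) : List String → List String
  | [] => []
  | x :: xs => if x ∈ s then dfS s xs else x :: dfS (s.add x) xs

-- A's second loop appends exactly dfS of the current seen-set
lemma loop2_eq (xs : List String) : ∀ (st : PySem.Set String × List String),
    (xs.foldl (fun (st : PySem.Set String × List String) x =>
        if !(st.1.contains x) then (st.1.add x, st.2 ++ [x]) else st) st).2
      = st.2 ++ dfS st.1 xs := by
  induction xs with
  | nil => intro st; simp [dfS]
  | cons x xs ih =>
      intro st
      rw [List.foldl_cons, ih]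
      by_cases h : x ∈ st.1
      · simp [dfS, h, PySem.Set.contains]
      · simp [dfS, h, PySem.Set.contains, PySem.Set.add]

-- PySem.Set.ofList is dfS from an arbitrary seed
lemma ofList_foldl_eq (xs : List String) : ∀ (s : PySem.Set String),
    xs.foldl PySem.Set.add s = s ++ dfS s xs := by
  induction xs with
  | nil => intro s; simp [dfS]
  | cons x xs ih =>
      intro s
      rw [List.foldl_cons, ih]
      by_cases h : x ∈ s
      · simp [dfS, h, PySem.Set.add, PySem.Set.contains]
      · simp [dfS, h, PySem.Set.add, PySem.Set.contains]

lemma dedup_eq_dfS (raw : List String) : PySem.List.dedup raw = dfS [] raw := by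
  rw [PySem.List.dedup_eq_ofList]
  show List.foldl PySem.Set.add PySem.Set.empty raw = dfS [] raw
  rw [show (PySem.Set.empty : PySem.Set String) = [] from rfl, ofList_foldl_eq]
  simp

-- elements produced by dfS were not in the seed set
lemma dfS_not_mem (xs : List String) : ∀ (s : PySem.Set String) (y : String),
    y ∈ dfS s xs → ¬ y ∈ s := by
  induction xs with
  | nil => intro s y h; simp [dfS] at h
  | cons x xs ih =>
      intro s y h
      by_cases hc : x ∈ s
      · exact ih s y (by simpa [dfS, hc] using h)
      · simp only [dfS, hc, if_false] at h
        rcases List.mem_cons.mp h with rfl | h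
        · exact hc
        · intro hy
          refine ih (s.add x) y h ?_
          simp [PySem.Set.add, PySem.Set.contains, hc, hy]

-- dfS with a larger seed is a filter of dfS with a smaller seed
lemma dfS_filter (xs : List String) : ∀ (s s' : PySem.Set String),
    (∀ y : String, y ∈ s' → y ∈ s) →
    dfS s xs = (dfS s' xs).filter (fun y => !decide (y ∈ s)) := by
  induction xs with
  | nil => intro s s' _; simp [dfS]
  | cons x xs ih =>
      intro s s' hsub
      by_cases h' : x ∈ s'
      · have hx : x ∈ s := hsub x h'
        simp [dfS, h', hx, ih s s' hsub]
      · by_cases h : x ∈ s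
        · have hsub' : ∀ y : String, y ∈ s'.add x → y ∈ s := by
            intro y hy
            simp only [PySem.Set.mem_add] at hy
            rcases hy with hy | rfl
            · exact hsub y hy
            · exact h
          simp [dfS, h', h, ih s (s'.add x) hsub']
        · have hsub' : ∀ y : String, y ∈ s'.add x → y ∈ s.add x := by
            intro y hy
            simp only [PySem.Set.mem_add] at hy ⊢
            rcases hy with hy | rfl
            · exact Or.inl (hsub y hy)
            · exact Or.inr rfl
          have ihx := ih (s.add x) (s'.add x) hsub'
          have hcong : (dfS (s'.add x) xs).filter (fun y => !decide (y ∈ s.add x))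
              = (dfS (s'.add x) xs).filter (fun y => !decide (y ∈ s)) := by
            apply List.filter_congr
            intro y hy
            have hne : y ≠ x := by
              intro he
              exact dfS_not_mem xs (s'.add x) y hy (by simp [PySem.Set.mem_add, he])
            simp [PySem.Set.mem_add, hne]
          rw [show dfS s (x :: xs) = x :: dfS (s.add x) xs from by simp [dfS, h],
            show dfS s' (x :: xs) = x :: dfS (s'.add x) xs from by simp [dfS, h'],
            ihx, hcong]
          simp [h]

-- helper facts about insertBy
lemma insertBy_all_before {α : Type} (before : α → α → Bool) (x : α) (ys : List α)
    (h : ∀ y ∈ ys, before x y = true) : PySem.List.insertBy before x ys = x :: ys := by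
  cases ys with
  | nil => rfl
  | cons y ys => simp [PySem.List.insertBy, h y (by simp)]

lemma insertBy_append {α : Type} (before : α → α → Bool) (x : α) (as bs : List α)
    (h : ∀ a ∈ as, before x a = false) :
    PySem.List.insertBy before x (as ++ bs) = as ++ PySem.List.insertBy before x bs := by
  induction as with
  | nil => simp
  | cons a as ih =>
      simp only [List.cons_append, PySem.List.insertBy, h a (by simp)]
      simp [ih (fun a ha => h a (by simp [ha]))]

-- stable sort with a key bounded by 2 is the concatenation of the three filters
lemma sorted_three_filters (xs : List String) (key : String → Nat)
    (hk : ∀ x : String, key x ≤ 2) :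
    PySem.List.sorted xs key false
      = xs.filter (fun x => key x == 0) ++ xs.filter (fun x => key x == 1)
          ++ xs.filter (fun x => key x == 2) := by
  induction xs using List.reverseRecOn with
  | nil => rfl
  | append_singleton xs x ih =>
      rw [PySem.List.sorted_eq_foldl_insertBy, List.foldl_append, List.foldl_cons, List.foldl_nil,
        ← PySem.List.sorted_eq_foldl_insertBy, ih]
      have hmem0 : ∀ y ∈ xs.filter (fun x => key x == 0), key y = 0 := by
        intro y hy; have := (List.mem_filter.mp hy).2; simpa using this
      have hmem1 : ∀ y ∈ xs.filter (fun x => key x == 1), key y = 1 := by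
        intro y hy; have := (List.mem_filter.mp hy).2; simpa using this
      have hmem2 : ∀ y ∈ xs.filter (fun x => key x == 2), key y = 2 := by
        intro y hy; have := (List.mem_filter.mp hy).2; simpa using this
      rcases (by have := hk x; omega : key x = 0 ∨ key x = 1 ∨ key x = 2) with h | h | h
      · -- key x = 0 : goes right after the 0-block
        rw [List.append_assoc,
          insertBy_append _ _ _ _ (by intro a ha; simp [h, hmem0 a ha]),
          insertBy_all_before _ _ _ (by
            intro y hy
            rcases List.mem_append.mp hy with hy | hy
            · simp [h, hmem1 y hy]
            · simp [h, hmem2 y hy])]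
        simp [List.filter_append, h]
      · -- key x = 1 : goes right after the 1-block
        rw [insertBy_append _ _ _ _ (by
            intro a ha
            rcases List.mem_append.mp ha with ha | ha
            · simp [h, hmem0 a ha]
            · simp [h, hmem1 a ha]),
          insertBy_all_before _ _ _ (by intro y hy; simp [h, hmem2 y hy])]
        simp [List.filter_append, h]
      · -- key x = 2 : goes at the very end
        rw [PySem.List.insertBy_of_forall_not_before _ _ _ (by
            intro y hy
            rcases List.mem_append.mp hy with hy | hy
            · rcases List.mem_append.mp hy with hy | hy
              · simp [h, hmem0 y hy]
              · simp [h, hmem1 y hy]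
            · simp [h, hmem2 y hy])]
        simp [List.filter_append, h]

lemma pvKey_le_two (s : String) : pvKey s ≤ 2 := by
  unfold pvKey; split_ifs <;> omega

lemma filter_key_singleton (raw : List String) (a : String)
    (ha : ∀ x : String, (pvKey x == pvKey a) = (x == a)) :
    (PySem.List.dedup raw).filter (fun x => pvKey x == pvKey a)
      = if a ∈ raw then [a] else [] := by
  have h1 : (PySem.List.dedup raw).filter (fun x => pvKey x == pvKey a)
      = (PySem.List.dedup raw).filter (fun x => decide (x = a)) := by
    apply List.filter_congr; intro y _
    rw [ha y]
    by_cases hy : y = a <;> simp [hy]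
  rw [h1, List.filter_eq]
  by_cases hm : a ∈ raw
  · have hc : (PySem.List.dedup raw).count a = 1 :=
      List.count_eq_one_of_mem (PySem.List.nodup_dedup raw) ((PySem.List.mem_dedup raw a).mpr hm)
    rw [hc, if_pos hm]
    rfl
  · have hc : (PySem.List.dedup raw).count a = 0 :=
      List.count_eq_zero.mpr (by simpa [PySem.List.mem_dedup] using hm)
    rw [hc, if_neg hm]
    rfl

-- the 2-filter of dedup equals dfS from the seed produced by A's first loop
lemma tail_eq (raw : List String) (s : PySem.Set String)
    (hs : ∀ y : String, y ∈ s ↔ ((y = "portada" ∨ y = "resumen") ∧ y ∈ raw)) :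
    dfS s raw = (PySem.List.dedup raw).filter (fun x => pvKey x == 2) := by
  rw [dfS_filter raw s [] (by intro y hy; simp at hy), ← dedup_eq_dfS]
  apply List.filter_congr
  intro y hy
  have hyraw : y ∈ raw := (PySem.List.mem_dedup raw y).mp hy
  by_cases h1 : y = "portada"
  · have hin : y ∈ s := (hs y).mpr ⟨Or.inl h1, hyraw⟩
    rw [h1] at hin
    simp [hin, pvKey, h1]
  · by_cases h2 : y = "resumen"
    · have hin : y ∈ s := (hs y).mpr ⟨Or.inr h2, hyraw⟩
      rw [h2] at hin
      simp [hin, pvKey, h2]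
    · have hns : ¬ y ∈ s := fun hy' => by
        rcases ((hs y).mp hy').1 with h | h
        · exact h1 h
        · exact h2 h
      simp [hns, pvKey, h1, h2]

-- ===== VERDICT (by name: the statement is the Claim_ definition above) =====
theorem normalize_section_order_py_spec : Claim_equal_normalize_section_order_py := by
  intro raw _
  unfold Spec_normalize_section_order_py normalize_section_order_py normalize_section_order_py_alt
  rw [sorted_three_filters (PySem.List.dedup raw) pvKey (fun x => pvKey_le_two x)]
  have hp' : ∀ x : String, (pvKey x == pvKey "portada") = (x == "portada") := by
    intro x
    by_cases h : x = "portada" <;> by_cases h2 : x = "resumen" <;> simp [pvKey, h, h2]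
  have hr' : ∀ x : String, (pvKey x == pvKey "resumen") = (x == "resumen") := by
    intro x
    by_cases h : x = "portada" <;> by_cases h2 : x = "resumen" <;> simp [pvKey, h, h2]
  have hf0 := filter_key_singleton raw "portada" hp'
  have hf1 := filter_key_singleton raw "resumen" hr'
  simp only [show pvKey "portada" = 0 from rfl] at hf0
  simp only [show pvKey "resumen" = 1 from rfl] at hf1
  rw [loop2_eq]
  by_cases hp : "portada" ∈ raw <;> by_cases hr : "resumen" ∈ raw
  · conv_lhs => simp [PySem.Set.empty, PySem.Set.add, PySem.Set.contains,
      List.contains_iff_mem, hp, hr]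
    rw [tail_eq raw (["portada", "resumen"]) (by
      intro y
      simp only [List.mem_cons, List.not_mem_nil, or_false]
      constructor
      · rintro (rfl | rfl)
        · exact ⟨Or.inl rfl, hp⟩
        · exact ⟨Or.inr rfl, hr⟩
      · rintro ⟨h, _⟩; exact h), hf0, hf1, if_pos hp, if_pos hr]
    simp
  · conv_lhs => simp [PySem.Set.empty, PySem.Set.add, PySem.Set.contains,
      List.contains_iff_mem, hp, hr]
    rw [tail_eq raw (["portada"]) (by
      intro y
      simp only [List.mem_cons, List.not_mem_nil, or_false]
      constructor
      · rintro rfl; exact ⟨Or.inl rfl, hp⟩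
      · rintro ⟨h, hyraw⟩
        rcases h with rfl | rfl
        · rfl
        · exact absurd hyraw hr), hf0, hf1, if_pos hp, if_neg hr]
    simp
  · conv_lhs => simp [PySem.Set.empty, PySem.Set.add, PySem.Set.contains,
      List.contains_iff_mem, hp, hr]
    rw [tail_eq raw (["resumen"]) (by
      intro y
      simp only [List.mem_cons, List.not_mem_nil, or_false]
      constructor
      · rintro rfl; exact ⟨Or.inr rfl, hr⟩
      · rintro ⟨h, hyraw⟩
        rcases h with rfl | rfl
        · exact absurd hyraw hp
        · rfl), hf0, hf1, if_neg hp, if_pos hr]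
    simp
  · conv_lhs => simp [PySem.Set.empty, PySem.Set.add, PySem.Set.contains,
      List.contains_iff_mem, hp, hr]
    rw [tail_eq raw ([] : List String) (by
      intro y
      simp only [List.not_mem_nil, false_iff]
      rintro ⟨h, hyraw⟩
      rcases h with rfl | rfl
      · exact absurd hyraw hp
      · exact absurd hyraw hr), hf0, hf1, if_neg hp, if_neg hr]
    simp
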